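-- pv_equiv track=rewrite | github.com/ytaek-oh/mmdetection | NIA_tools/convert_annotation_to_json.py | group_polygon
-- ===== SOURCE A (Python) =====
-- from collections import OrderedDict
--
-- def group_polygon(points, groups, labels):
--     grouping_dict = OrderedDict()
--     for group in groups:
--         if group != -1:
--             grouping_dict[group] = dict(segmentation=[], categories=[])
--
--     for poly, group, label in zip(points, groups, labels):
--         if group != -1:
--             grouping_dict[group]['segmentation'].append(poly)
--             grouping_dict[group]['categories'].append(label)
--
--     # final lists(ordered, then grouped) that should be returned
--     segmentations = []
--     labels_seg = []
--     done_group = []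
--     for poly, group, label in zip(points, groups, labels):
--         if group != -1:
--             if group in done_group:
--                 assert group not in grouping_dict.keys()
--                 continue
--
--             # first in, first out
--             key, dict_item = grouping_dict.popitem(last=False)
--             assert key == group
--
--             segment = dict_item['segmentation']
--             categories = dict_item['categories']
--             category_set = set(categories)
--
--             assert len(category_set) == 1
--             category_id = category_set.pop()
--             done_group.append(group)
--         else:
--             segment = [poly]
--             category_id = label
--
--         segmentations.append(segment)
--         labels_seg.append(category_id)
--     assert len(grouping_dict) == 0
--     return segmentations, labels_seg
-- ===== SOURCE B (Python) =====
-- def group_polygon(points, groups, labels):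
--     # One pass over zip builds the per-group segmentation/categories and the
--     # output slot order; a second short pass materialises the outputs.
--     acc = {}      # group id -> (segmentation, categories)
--     order = []    # output slots in order: (group, poly, label)
--     for poly, group, label in zip(points, groups, labels):
--         if group == -1:
--             order.append((group, poly, label))
--         elif group in acc:
--             seg, cats = acc[group]
--             seg.append(poly)
--             cats.append(label)
--         else:
--             acc[group] = ([poly], [label])
--             order.append((group, poly, label))
--     segmentations = []
--     labels_seg = []
--     for group, poly, label in order:
--         if group == -1:
--             segmentations.append([poly])
--             labels_seg.append(label)
--         else:
--             seg, cats = acc[group]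
--             assert len(set(cats)) == 1
--             segmentations.append(seg)
--             labels_seg.append(cats[0])
--     return segmentations, labels_seg
-- ===== Notes on version B (the rewrite author's own statement) =====
-- stated objective: simpler
-- what changed: Replaces A's three passes (pre-seeding an OrderedDict, a fill pass, and a replay pass with popitem(last=False) and a done_group list) by one grouping pass that records output slots plus a short materialisation pass over the slots.
import Mathlib
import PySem

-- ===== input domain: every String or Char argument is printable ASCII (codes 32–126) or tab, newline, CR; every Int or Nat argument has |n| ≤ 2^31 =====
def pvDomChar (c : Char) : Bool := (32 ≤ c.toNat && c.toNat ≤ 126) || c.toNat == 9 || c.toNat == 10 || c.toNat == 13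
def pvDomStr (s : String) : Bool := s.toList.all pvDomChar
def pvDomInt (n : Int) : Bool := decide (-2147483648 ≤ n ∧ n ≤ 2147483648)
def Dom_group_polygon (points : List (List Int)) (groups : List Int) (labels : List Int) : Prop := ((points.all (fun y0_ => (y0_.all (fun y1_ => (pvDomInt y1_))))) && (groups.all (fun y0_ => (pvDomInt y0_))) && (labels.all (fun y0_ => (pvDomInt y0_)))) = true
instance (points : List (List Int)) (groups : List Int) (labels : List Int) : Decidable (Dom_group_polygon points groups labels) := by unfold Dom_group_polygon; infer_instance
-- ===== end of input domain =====

-- B replaces A's three loops (pre-seeded OrderedDict, fill loop, FIFO popitem/done_group replay)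
-- by one grouping pass that records output slots, plus a short materialisation pass: simpler.

-- ===== PORT A =====
-- The inner dict(segmentation=…, categories=…) has a fixed shape: ported as a pair (segmentation, categories).
def group_polygon (points : List (List Int)) (groups : List Int) (labels : List Int) : List (List (List Int)) × List Int :=
  let ts := points.zip (groups.zip labels)
  let gd0 : PySem.Dict Int (List (List Int) × List Int) :=
    groups.foldl (fun d g => if g ≠ -1 then d.insert g ([], []) else d) PySem.Dict.empty
  let gd1 := ts.foldl
    (fun d t => if t.2.1 ≠ -1 then
        d.modify t.2.1 ([], []) (fun it => (it.1 ++ [t.1], it.2 ++ [t.2.2]))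
      else d) gd0
  let fin := ts.foldl
    (fun (st : PySem.Dict Int (List (List Int) × List Int) × List (List (List Int)) × List Int × List Int) t =>
      if t.2.1 ≠ -1 then
        if t.2.1 ∈ st.2.2.2 then st   -- 'continue'
        else
          match st.1.items with
          | [] => st                   -- popitem on an empty dict raises KeyError: unreachable inside Pre_
          | (_, item) :: rest =>       -- popitem(last=False): first item, FIFO
            (PySem.Dict.mk rest,
             st.2.1 ++ [item.1],
             st.2.2.1 ++ [(PySem.Set.ofList item.2).headD 0],  -- set(categories).pop(): exact, the set is a singleton inside Pre_
             st.2.2.2 ++ [t.2.1])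
      else (st.1, st.2.1 ++ [[t.1]], st.2.2.1 ++ [t.2.2], st.2.2.2))
    (gd1, ([], [], []))
  (fin.2.1, fin.2.2.1)

-- ===== PORT B =====
def group_polygon_alt (points : List (List Int)) (groups : List Int) (labels : List Int) : List (List (List Int)) × List Int :=
  let ts := points.zip (groups.zip labels)
  let fin := ts.foldl
    (fun (st : PySem.Dict Int (List (List Int) × List Int) × List (Int × List Int × Int)) t =>
      if t.2.1 = -1 then (st.1, st.2 ++ [(t.2.1, t.1, t.2.2)])
      else if st.1.contains t.2.1 then
        (st.1.modify t.2.1 ([], []) (fun pr => (pr.1 ++ [t.1], pr.2 ++ [t.2.2])), st.2)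
      else (st.1.insert t.2.1 ([t.1], [t.2.2]), st.2 ++ [(t.2.1, t.1, t.2.2)]))
    ((PySem.Dict.empty : PySem.Dict Int (List (List Int) × List Int)), ([] : List (Int × List Int × Int)))
  let outs := fin.2.map (fun s =>
    if s.1 = -1 then ([s.2.1], s.2.2)
    else
      let pr := fin.1.getD s.1 ([], [])
      (pr.1, pr.2.headD 0))            -- cats[0]: the list is nonempty by construction
  (outs.map (·.1), outs.map (·.2))

-- ===== PRECONDITION & SPEC =====
-- Pre_ excludes exactly the inputs on which A raises AssertionError (or KeyError): a non-(-1)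
-- group id that never occurs within the zipped prefix (leftover dict entry), or two zipped
-- entries of the same non-(-1) group carrying different labels (len(set(categories)) != 1).
def Pre_group_polygon (points : List (List Int)) (groups : List Int) (labels : List Int) : Prop :=
  let n := min points.length (min groups.length labels.length)
  (∀ g ∈ groups, g ≠ -1 → g ∈ groups.take n) ∧
  (∀ p ∈ (groups.take n).zip (labels.take n), ∀ q ∈ (groups.take n).zip (labels.take n),
      p.1 ≠ -1 → p.1 = q.1 → p.2 = q.2)
instance (points : List (List Int)) (groups : List Int) (labels : List Int) : Decidable (Pre_group_polygon points groups labels) := by unfold Pre_group_polygon; infer_instance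
def pvWitness_group_polygon : List (List Int) × List Int × List Int := ([[1], [2], [3]], [0, -1, 0], [5, 7, 5])

def Spec_group_polygon (points : List (List Int)) (groups : List Int) (labels : List Int) (out : List (List (List Int)) × List Int) : Prop := out = group_polygon_alt points groups labels
instance (points : List (List Int)) (groups : List Int) (labels : List Int) (out : List (List (List Int)) × List Int) : Decidable (Spec_group_polygon points groups labels out) := by unfold Spec_group_polygon; infer_instance

-- ===== CLAIM (what is proved, stated in full; the proofs are below) =====
def Claim_equal_group_polygon : Prop := ∀ (points : List (List Int)) (groups : List Int) (labels : List Int), Dom_group_polygon points groups labels → Pre_group_polygon points groups labels → Spec_group_polygon points groups labels (group_polygon points groups labels)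

-- ===== LEMMAS AND PROOFS =====

def gpPolys (g : Int) (ts : List (List Int × Int × Int)) : List (List Int) :=
  (ts.filter (fun t => t.2.1 == g)).map (·.1)
def gpLabs (g : Int) (ts : List (List Int × Int × Int)) : List Int :=
  (ts.filter (fun t => t.2.1 == g)).map (·.2.2)

def gpKept : List Int → List (List Int × Int × Int) → List (Int × List Int × Int)
  | _, [] => []
  | seen, t :: r =>
    if t.2.1 = -1 then (t.2.1, t.1, t.2.2) :: gpKept seen r
    else if t.2.1 ∈ seen then gpKept seen r
    else (t.2.1, t.1, t.2.2) :: gpKept (seen ++ [t.2.1]) r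

def gpMod (d : PySem.Dict Int (List (List Int) × List Int)) (t : List Int × Int × Int) :
    PySem.Dict Int (List (List Int) × List Int) :=
  if t.2.1 = -1 then d else d.modify t.2.1 ([], []) (fun pr => (pr.1 ++ [t.1], pr.2 ++ [t.2.2]))

lemma gp_headD (xs : List Int) : (PySem.Set.ofList xs).headD 0 = xs.headD 0 := by
  cases xs with
  | nil => rfl
  | cons c t => rw [PySem.Set.ofList_cons]; rfl

lemma gp_B_fold (r : List (List Int × Int × Int)) :
    ∀ (d : PySem.Dict Int (List (List Int) × List Int)) (ord : List (Int × List Int × Int)),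
    r.foldl (fun st t =>
      if t.2.1 = -1 then (st.1, st.2 ++ [(t.2.1, t.1, t.2.2)])
      else if st.1.contains t.2.1 then
        (st.1.modify t.2.1 ([], []) (fun pr => (pr.1 ++ [t.1], pr.2 ++ [t.2.2])), st.2)
      else (st.1.insert t.2.1 ([t.1], [t.2.2]), st.2 ++ [(t.2.1, t.1, t.2.2)])) (d, ord)
      = (r.foldl gpMod d, ord ++ gpKept d.keys r) := by
  induction r with
  | nil => intro d ord; simp [gpKept]
  | cons t r ih =>
    intro d ord
    simp only [List.foldl_cons, gpKept]
    by_cases h1 : t.2.1 = -1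
    · simp [h1, ih, gpMod]
    · rw [if_neg h1]
      by_cases h2 : d.contains t.2.1
      · have hmem : t.2.1 ∈ d.keys := (PySem.Dict.contains_iff_mem_keys _ _).1 h2
        rw [if_neg h1, if_pos h2, ih, if_pos hmem]
        have hk : (d.modify t.2.1 ([], []) (fun pr => (pr.1 ++ [t.1], pr.2 ++ [t.2.2]))).keys = d.keys := by
          rw [PySem.Dict.keys_modify, PySem.Dict.keys_insert_of_contains _ _ h2]
        have hm : d.modify t.2.1 ([], []) (fun pr => (pr.1 ++ [t.1], pr.2 ++ [t.2.2])) = gpMod d t := by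
          rw [gpMod, if_neg h1]
        rw [hm] at hk ⊢
        rw [hk]
      · have hmem : t.2.1 ∉ d.keys := fun hm => h2 ((PySem.Dict.contains_iff_mem_keys _ _).2 hm)
        rw [if_neg h1, if_neg h2, ih, if_neg hmem]
        have h2' : d.contains t.2.1 = false := by simpa using h2
        have hins : d.insert t.2.1 (([t.1], [t.2.2])) = gpMod d t := by
          simp [gpMod, if_neg h1, PySem.Dict.modify, PySem.Dict.getD_of_not_contains (h := h2')]
        have hkeys : (d.insert t.2.1 (([t.1], [t.2.2]))).keys = d.keys ++ [t.2.1] :=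
          PySem.Dict.keys_insert_of_not_contains _ _ h2'
        rw [← hins, hkeys]
        simp

lemma gp_getD_fold (r : List (List Int × Int × Int)) :
    ∀ (d : PySem.Dict Int (List (List Int) × List Int)) (g : Int), g ≠ -1 →
    (r.foldl gpMod d).getD g ([], [])
      = ((d.getD g ([], [])).1 ++ gpPolys g r, (d.getD g ([], [])).2 ++ gpLabs g r) := by
  induction r with
  | nil => intro d g hg; simp [gpPolys, gpLabs]
  | cons t r ih =>
    intro d g hg
    rw [List.foldl_cons]
    by_cases h1 : t.2.1 = -1
    · rw [gpMod, if_pos h1, ih _ _ hg]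
      have hne : (t.2.1 == g) = false := by simp [h1]; omega
      simp [gpPolys, gpLabs, hne]
    · rw [gpMod, if_neg h1, ih _ _ hg]
      by_cases he : g = t.2.1
      · subst he
        rw [PySem.Dict.getD_modify_self]
        simp [gpPolys, gpLabs]
      · rw [PySem.Dict.getD_modify_of_ne (hne := he)]
        have hne : (t.2.1 == g) = false := by simpa using fun h => he h.symm
        simp [gpPolys, gpLabs, hne]

-- loop1: pre-seeding the OrderedDict
lemma gp_gd0 (gs : List Int) :
    ∀ (S : List Int),
    gs.foldl (fun d g => if g ≠ -1 then d.insert g ([], []) else d)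
        (PySem.Dict.mk (S.map (fun g => (g, (([] : List (List Int)), ([] : List Int))))))
      = PySem.Dict.mk ((PySem.Set.update S (gs.filter (fun g => g != -1))).map
          (fun g => (g, (([] : List (List Int)), ([] : List Int))))) := by
  induction gs with
  | nil => intro S; simp [PySem.Set.update_nil]
  | cons g gs ih =>
    intro S
    rw [List.foldl_cons, List.filter_cons]
    by_cases h1 : g = -1
    · have hb : (g != -1) = false := by simp [h1]
      rw [if_neg (fun h => h h1), hb]
      simp only [Bool.false_eq_true, if_false]
      exact ih S
    · have hb : (g != -1) = true := by simpa using h1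
      rw [if_pos (by simpa using h1), if_pos hb, PySem.Set.update_cons]
      have hkeys : (PySem.Dict.mk (S.map (fun g => (g, (([] : List (List Int)), ([] : List Int)))))).keys = S := by
        simp only [PySem.Dict.keys_mk, List.map_map]
        have : ((fun (x : Int × List (List Int) × List Int) => x.1) ∘ fun g => ((g, ([], [])) : Int × List (List Int) × List Int)) = id := rfl
        rw [this, List.map_id]
      by_cases hm : g ∈ S
      · have hc : (PySem.Dict.mk (S.map (fun g => (g, (([] : List (List Int)), ([] : List Int)))))).contains g = true := by
          rw [PySem.Dict.contains_iff_mem_keys, hkeys]; exact hm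
        have hd : (PySem.Dict.mk (S.map (fun g => (g, (([] : List (List Int)), ([] : List Int)))))).insert g ([], [])
            = PySem.Dict.mk (S.map (fun g => (g, (([] : List (List Int)), ([] : List Int))))) := by
          apply PySem.Dict.ext
          rw [PySem.Dict.items_insert_of_contains _ _ hc]
          show List.map _ (S.map (fun g => (g, (([] : List (List Int)), ([] : List Int))))) = _
          rw [List.map_map]
          apply List.map_congr_left
          intro x _
          by_cases hx : x = g <;> simp [hx, Function.comp]
        rw [hd, ih, PySem.Set.add_of_mem hm]
      · have hc : (PySem.Dict.mk (S.map (fun g => (g, (([] : List (List Int)), ([] : List Int)))))).contains g = false := by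
          by_contra h
          have hct : (PySem.Dict.mk (S.map (fun g => (g, (([] : List (List Int)), ([] : List Int)))))).contains g = true := by
            simpa using h
          have := (PySem.Dict.contains_iff_mem_keys _ _).1 hct
          rw [hkeys] at this
          exact hm this
        have hd : (PySem.Dict.mk (S.map (fun g => (g, (([] : List (List Int)), ([] : List Int)))))).insert g ([], [])
            = PySem.Dict.mk ((S ++ [g]).map (fun g => (g, (([] : List (List Int)), ([] : List Int))))) := by
          apply PySem.Dict.ext
          rw [PySem.Dict.items_insert_of_not_contains _ _ hc]
          show S.map (fun g => (g, (([] : List (List Int)), ([] : List Int)))) ++ _ = _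
          simp
        rw [hd, ih, PySem.Set.add_of_not_mem hm]

-- loop2: the fill pass, on a dict holding exactly the keys S
lemma gp_gd1 (r : List (List Int × Int × Int)) :
    ∀ (S : List Int) (v : Int → List (List Int) × List Int),
    S.Nodup → (-1 : Int) ∉ S → (∀ t ∈ r, t.2.1 ≠ -1 → t.2.1 ∈ S) →
    r.foldl gpMod (PySem.Dict.mk (S.map (fun g => (g, v g))))
      = PySem.Dict.mk (S.map (fun g => (g, ((v g).1 ++ gpPolys g r, (v g).2 ++ gpLabs g r)))) := by
  induction r with
  | nil =>
    intro S v _ _ _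
    simp [gpPolys, gpLabs]
  | cons t r ih =>
    intro S v hnd hne hmem
    rw [List.foldl_cons]
    by_cases h1 : t.2.1 = -1
    · rw [gpMod, if_pos h1, ih S v hnd hne (fun u hu => hmem u (List.mem_cons_of_mem _ hu))]
      congr 1
      apply List.map_congr_left
      intro g hg
      have : (t.2.1 == g) = false := by
        simp [h1]
        intro h; exact hne (h ▸ hg)
      simp [gpPolys, gpLabs, this]
    · have hgS : t.2.1 ∈ S := hmem t (List.mem_cons_self) h1
      have hkeys : (PySem.Dict.mk (S.map (fun g => (g, v g)))).keys = S := by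
        simp only [PySem.Dict.keys_mk, List.map_map]
        have : ((fun (x : Int × List (List Int) × List Int) => x.1) ∘ fun g => (g, v g)) = id := rfl
        rw [this, List.map_id]
      have hndk : (PySem.Dict.mk (S.map (fun g => (g, v g)))).keys.Nodup := by rw [hkeys]; exact hnd
      have hc : (PySem.Dict.mk (S.map (fun g => (g, v g)))).contains t.2.1 = true := by
        rw [PySem.Dict.contains_iff_mem_keys, hkeys]; exact hgS
      have hget : (PySem.Dict.mk (S.map (fun g => (g, v g)))).getD t.2.1 ([], []) = v t.2.1 :=
        PySem.Dict.getD_of_mem_items _ (show (t.2.1, v t.2.1) ∈ (S.map (fun g => (g, v g))) from List.mem_map_of_mem hgS) hndk _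
      have hstep : gpMod (PySem.Dict.mk (S.map (fun g => (g, v g)))) t
          = PySem.Dict.mk (S.map (fun g => (g, if g = t.2.1 then ((v g).1 ++ [t.1], (v g).2 ++ [t.2.2]) else v g))) := by
        rw [gpMod, if_neg h1, PySem.Dict.modify, hget]
        apply PySem.Dict.ext
        rw [PySem.Dict.items_insert_of_contains _ _ hc]
        show List.map _ (S.map (fun g => (g, v g))) = List.map (fun g => (g, if g = t.2.1 then ((v g).1 ++ [t.1], (v g).2 ++ [t.2.2]) else v g)) S
        rw [List.map_map]
        apply List.map_congr_left
        intro g hg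
        by_cases hx : g = t.2.1 <;> simp [Function.comp, hx]
      rw [hstep, ih S _ hnd hne (fun u hu => hmem u (List.mem_cons_of_mem _ hu))]
      congr 1
      apply List.map_congr_left
      intro g hg
      by_cases hx : g = t.2.1
      · have hb : (t.2.1 == g) = true := by simp [hx]
        simp [hx, gpPolys, gpLabs]
      · have hb : (t.2.1 == g) = false := by simpa using fun h => hx h.symm
        simp [hx, gpPolys, gpLabs, hb]

def gpOutA (E : Int → List (List Int) × List Int) (s : Int × List Int × Int) : List (List Int) × Int :=
  if s.1 = -1 then ([s.2.1], s.2.2) else ((E s.1).1, (PySem.Set.ofList (E s.1).2).headD 0)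

-- loop3: the FIFO replay pass consumes the dict front to back
lemma gp_loop3 (E : Int → List (List Int) × List Int) (r : List (List Int × Int × Int)) :
    ∀ (seen rest : List Int)
      (segs : List (List (List Int))) (labs : List Int),
    PySem.Set.update seen ((r.map (fun t => t.2.1)).filter (fun g => g != -1)) = seen ++ rest →
    r.foldl (fun (st : PySem.Dict Int (List (List Int) × List Int) × List (List (List Int)) × List Int × List Int) t =>
      if t.2.1 ≠ -1 then
        if t.2.1 ∈ st.2.2.2 then st
        else
          match st.1.items with
          | [] => st
          | (_, item) :: rest =>
            (PySem.Dict.mk rest,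
             st.2.1 ++ [item.1],
             st.2.2.1 ++ [(PySem.Set.ofList item.2).headD 0],
             st.2.2.2 ++ [t.2.1])
      else (st.1, st.2.1 ++ [[t.1]], st.2.2.1 ++ [t.2.2], st.2.2.2))
      (PySem.Dict.mk (rest.map (fun g => (g, E g))), segs, labs, seen)
      = (PySem.Dict.mk [], segs ++ (gpKept seen r).map (fun s => (gpOutA E s).1),
         labs ++ (gpKept seen r).map (fun s => (gpOutA E s).2), seen ++ rest) := by
  induction r with
  | nil =>
    intro seen rest segs labs hG
    rw [List.map_nil, List.filter_nil, PySem.Set.update_nil] at hG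
    have hr : rest = [] := by
      have := congrArg List.length hG
      simp at this
      exact this
    subst hr
    simp [gpKept]
  | cons t r ih =>
    intro seen rest segs labs hG
    rw [List.foldl_cons]
    by_cases h1 : t.2.1 = -1
    · rw [if_neg (fun h => h h1)]
      rw [List.map_cons, List.filter_cons, if_neg (by simp [h1])] at hG
      rw [ih seen rest _ _ hG]
      have hk : gpKept seen (t :: r) = (t.2.1, t.1, t.2.2) :: gpKept seen r := by
        rw [gpKept, if_pos h1]
      rw [hk]
      simp [gpOutA, h1]
    · rw [if_pos (by simpa using h1)]
      rw [List.map_cons, List.filter_cons, if_pos (by simpa using h1), PySem.Set.update_cons] at hG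
      by_cases h2 : t.2.1 ∈ seen
      · rw [if_pos h2]
        rw [PySem.Set.add_of_mem h2] at hG
        rw [ih seen rest _ _ hG]
        have hk : gpKept seen (t :: r) = gpKept seen r := by
          rw [gpKept, if_neg h1, if_pos h2]
        rw [hk]
      · rw [if_neg h2]
        rw [PySem.Set.add_of_not_mem h2] at hG
        -- rest begins with t.2.1
        have hshape := PySem.Set.update_eq_append_filter (seen ++ [t.2.1]) ((r.map (fun t => t.2.1)).filter (fun g => g != -1))
        rw [hG] at hshape
        have hrest : rest = t.2.1 :: List.filter (fun y => !(PySem.Set.contains (seen ++ [t.2.1]) y)) (PySem.Set.ofList ((r.map (fun t => t.2.1)).filter (fun g => g != -1))) := by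
          have h' : seen ++ rest = seen ++ (t.2.1 :: List.filter (fun y => !(PySem.Set.contains (seen ++ [t.2.1]) y)) (PySem.Set.ofList ((r.map (fun t => t.2.1)).filter (fun g => g != -1)))) := by
            rw [hshape]; simp
          exact List.append_cancel_left h'
        set J := List.filter (fun y => !(PySem.Set.contains (seen ++ [t.2.1]) y)) (PySem.Set.ofList ((r.map (fun t => t.2.1)).filter (fun g => g != -1))) with hJ
        have hG' : PySem.Set.update (seen ++ [t.2.1]) ((r.map (fun t => t.2.1)).filter (fun g => g != -1)) = (seen ++ [t.2.1]) ++ J := by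
          rw [PySem.Set.update_eq_append_filter]
        rw [hrest]
        show r.foldl _ (PySem.Dict.mk (J.map (fun g => (g, E g))), segs ++ [(E t.2.1).1], labs ++ [(PySem.Set.ofList (E t.2.1).2).headD 0], seen ++ [t.2.1]) = _
        rw [ih (seen ++ [t.2.1]) J _ _ hG']
        have hk : gpKept seen (t :: r) = (t.2.1, t.1, t.2.2) :: gpKept (seen ++ [t.2.1]) r := by
          rw [gpKept, if_neg h1, if_neg h2]
        rw [hk]
        simp [gpOutA, h1]

lemma gp_absorb (a b : List Int) (h : ∀ x ∈ b, x ∈ a) :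
    PySem.Set.ofList (a ++ b) = PySem.Set.ofList a := by
  rw [PySem.Set.ofList_append, PySem.Set.update_eq_append_filter]
  have : List.filter (fun y => !(PySem.Set.ofList a).contains y) (PySem.Set.ofList b) = [] := by
    rw [List.filter_eq_nil_iff]
    intro y hy
    have : y ∈ a := h y ((PySem.Set.mem_ofList _ _).1 hy)
    simp [PySem.Set.contains_eq_listContains, PySem.Set.mem_ofList]
    exact this
  rw [this, List.append_nil]

lemma gp_ts_pairs (ps : List (List Int)) : ∀ (gs ls : List Int),
    (ps.zip (gs.zip ls)).map (fun t => t.2)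
      = (gs.take (min ps.length (min gs.length ls.length))).zip
        (ls.take (min ps.length (min gs.length ls.length))) := by
  induction ps with
  | nil => intro gs ls; simp
  | cons p ps ih =>
    intro gs ls
    cases gs with
    | nil => simp
    | cons g gs =>
      cases ls with
      | nil => simp
      | cons l ls =>
        simp only [List.zip_cons_cons, List.map_cons, List.length_cons, ih gs ls,
          Nat.succ_min_succ, List.take_succ_cons]

lemma gp_ts_groups (ps : List (List Int)) (gs ls : List Int) :
    (ps.zip (gs.zip ls)).map (fun t => t.2.1)
      = gs.take (min ps.length (min gs.length ls.length)) := by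
  have h1 : (ps.zip (gs.zip ls)).map (fun t => t.2.1)
      = ((ps.zip (gs.zip ls)).map (fun t => t.2)).map Prod.fst := by
    rw [List.map_map]; rfl
  rw [h1, gp_ts_pairs]
  apply List.map_fst_zip
  simp

def gpOutB (ts : List (List Int × Int × Int)) (s : Int × List Int × Int) : List (List Int) × Int :=
  if s.1 = -1 then ([s.2.1], s.2.2) else (gpPolys s.1 ts, (gpLabs s.1 ts).headD 0)

lemma gp_out_eq (ts : List (List Int × Int × Int)) (s : Int × List Int × Int) :
    gpOutA (fun g => (gpPolys g ts, gpLabs g ts)) s = gpOutB ts s := by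
  rw [gpOutA, gpOutB]
  by_cases h : s.1 = -1
  · simp [h]
  · simp only [h, if_false]
    rw [gp_headD]

lemma gp_B_result (points : List (List Int)) (groups : List Int) (labels : List Int) :
    group_polygon_alt points groups labels
      = ((gpKept [] (points.zip (groups.zip labels))).map (fun s => (gpOutB (points.zip (groups.zip labels)) s).1),
         (gpKept [] (points.zip (groups.zip labels))).map (fun s => (gpOutB (points.zip (groups.zip labels)) s).2)) := by
  set ts := points.zip (groups.zip labels) with hts
  rw [group_polygon_alt]
  have hemp : (PySem.Dict.empty : PySem.Dict Int (List (List Int) × List Int)).keys = [] := rfl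
  rw [gp_B_fold]
  simp only [hemp, List.nil_append]
  have houts : (gpKept [] ts).map (fun s =>
      if s.1 = -1 then (([s.2.1], s.2.2) : List (List Int) × Int)
      else
        let pr := (ts.foldl gpMod PySem.Dict.empty).getD s.1 ([], [])
        (pr.1, pr.2.headD 0))
      = (gpKept [] ts).map (gpOutB ts) := by
    apply List.map_congr_left
    intro s _
    by_cases h : s.1 = -1
    · simp [gpOutB, h]
    · have hg := gp_getD_fold ts PySem.Dict.empty s.1 h
      have hde : (PySem.Dict.empty : PySem.Dict Int (List (List Int) × List Int)).getD s.1 ([], []) = ([], []) := rfl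
      rw [hde] at hg
      simp only [List.nil_append] at hg
      simp [gpOutB, h, hg]
  rw [houts, List.map_map, List.map_map]
  rfl

lemma gp_A_result (points : List (List Int)) (groups : List Int) (labels : List Int)
    (hpre1 : ∀ g ∈ groups, g ≠ -1 → g ∈ groups.take (min points.length (min groups.length labels.length))) :
    group_polygon points groups labels
      = ((gpKept [] (points.zip (groups.zip labels))).map (fun s => (gpOutB (points.zip (groups.zip labels)) s).1),
         (gpKept [] (points.zip (groups.zip labels))).map (fun s => (gpOutB (points.zip (groups.zip labels)) s).2)) := by
  set n := min points.length (min groups.length labels.length) with hn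
  set ts := points.zip (groups.zip labels) with hts
  set G : List Int := PySem.Set.ofList ((ts.map (fun t => t.2.1)).filter (fun g => g != -1)) with hG
  have htsg : ts.map (fun t => t.2.1) = groups.take n := gp_ts_groups points groups labels
  -- the pre-seeded dict holds exactly the keys G
  have hG0 : PySem.Set.ofList (groups.filter (fun g => g != -1)) = G := by
    conv_lhs => rw [← List.take_append_drop n groups]
    rw [List.filter_append]
    rw [gp_absorb]
    · rw [hG, htsg]
    · intro x hx
      have hxd := List.mem_filter.1 hx
      have hxg : x ∈ groups := by
        have h2 : x ∈ groups.take n ++ groups.drop n := List.mem_append.2 (Or.inr hxd.1)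
        rwa [List.take_append_drop] at h2
      have hxne : x ≠ -1 := by simpa using hxd.2
      exact List.mem_filter.2 ⟨hpre1 x hxg hxne, hxd.2⟩
  have hgd0 : groups.foldl (fun d g => if g ≠ -1 then d.insert g ([], []) else d)
      (PySem.Dict.empty : PySem.Dict Int (List (List Int) × List Int))
      = PySem.Dict.mk (G.map (fun g => (g, (([] : List (List Int)), ([] : List Int))))) := by
    have := gp_gd0 groups []
    simp only [List.map_nil] at this
    rw [show (PySem.Dict.empty : PySem.Dict Int (List (List Int) × List Int)) = PySem.Dict.mk [] from rfl, this,
      PySem.Set.update_nil_left, hG0]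
  -- the fill pass
  have hGnd : G.Nodup := PySem.Set.nodup_ofList _
  have hGne : (-1 : Int) ∉ G := by
    intro hm
    have := (PySem.Set.mem_ofList _ _).1 hm
    have := (List.mem_filter.1 this).2
    simp at this
  have hGmem : ∀ t ∈ ts, t.2.1 ≠ -1 → t.2.1 ∈ G := by
    intro t ht hne
    apply (PySem.Set.mem_ofList _ _).2
    apply List.mem_filter.2
    exact ⟨List.mem_map_of_mem ht, by simpa using hne⟩
  have hgd1 : ts.foldl
      (fun d t => if t.2.1 ≠ -1 then
          d.modify t.2.1 ([], []) (fun it => (it.1 ++ [t.1], it.2 ++ [t.2.2]))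
        else d)
      (PySem.Dict.mk (G.map (fun g => (g, (([] : List (List Int)), ([] : List Int))))))
      = PySem.Dict.mk (G.map (fun g => (g, (gpPolys g ts, gpLabs g ts)))) := by
    rw [List.foldl_ext _ gpMod _ (l := ts) (by
      intro d t _
      rw [gpMod]
      by_cases h : t.2.1 = -1
      · rw [if_neg (fun hh => hh h), if_pos h]
      · rw [if_pos h, if_neg h])]
    rw [gp_gd1 ts G _ hGnd hGne hGmem]
    simp
  rw [group_polygon, ← hts, hgd0, hgd1]
  rw [gp_loop3 (fun g => (gpPolys g ts, gpLabs g ts)) ts [] G [] [] (by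
    rw [PySem.Set.update_nil_left]
    simp [hG])]
  simp only [List.nil_append]
  refine congrArg₂ Prod.mk ?_ ?_ <;> (apply List.map_congr_left; intro s _; rw [gp_out_eq])


-- ===== VERDICT (by name: the statement is the Claim_ definition above) =====
theorem group_polygon_spec : Claim_equal_group_polygon := by
  intro points groups labels _ hpre
  unfold Spec_group_polygon
  simp only [Pre_group_polygon] at hpre
  rw [gp_A_result points groups labels hpre.1, gp_B_result points groups labels]
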